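-- pv_equiv track=rewrite | github.com/laclustr/CSP | Problem Sets/CSP-Pset3/grant_vance_pset3.py | warhol_effect
-- ===== SOURCE A (Python) =====
-- def combine_2pics(image1, image2):
-- 	new_img = []
-- 	for row in range(len(image1)):
-- 		new_img += [image1[row] + image2[row]]
-- 	return new_img
--
-- def make_1_color(image, color):
-- 	new_img = []
-- 	for row in range(len(image)):
-- 		new_row = []
-- 		for px_rgb in range(len(image[row])):
-- 			if color == "red":
-- 				new_px_rgb = [image[row][px_rgb][0], 0, 0]
-- 			elif color == "green":
-- 				new_px_rgb = [0, image[row][px_rgb][1], 0]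
-- 			elif color == "blue":
-- 				new_px_rgb = [0, 0, image[row][px_rgb][2]]
-- 			new_row.append(new_px_rgb)
-- 		new_img.append(new_row)
-- 	return new_img
--
-- def warhol_effect(image):
-- 	TL = []
-- 	TR = make_1_color(image, "red")
-- 	BL = make_1_color(image, "blue")
-- 	BR = make_1_color(image, "green")
--
-- 	for row in range(len(image)):
-- 		new_row = []
-- 		for px_rgb in range(len(image[row])):
-- 			new_px_rgb = [0, image[row][px_rgb][1], image[row][px_rgb][2]]
-- 			new_row.append(new_px_rgb)
-- 		TL.append(new_row)
--
-- 	top = combine_2pics(TL, TR)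
-- 	btm = combine_2pics(BL, BR)
-- 	top.extend(btm)
--
-- 	return top
-- ===== SOURCE B (Python) =====
-- def warhol_effect(image):
-- 	top = []
-- 	btm = []
-- 	for row in image:
-- 		top.append([[0, px[1], px[2]] for px in row] + [[px[0], 0, 0] for px in row])
-- 		btm.append([[0, 0, px[2]] for px in row] + [[0, px[1], 0] for px in row])
-- 	return top + btm
-- ===== Notes on version B (the rewrite author's own statement) =====
-- stated objective: simpler
-- what changed: One pass over the input rows building both half-images incrementally with per-row comprehensions, instead of constructing four complete filtered images and merging them with two separate combine passes.
import Mathlib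
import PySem

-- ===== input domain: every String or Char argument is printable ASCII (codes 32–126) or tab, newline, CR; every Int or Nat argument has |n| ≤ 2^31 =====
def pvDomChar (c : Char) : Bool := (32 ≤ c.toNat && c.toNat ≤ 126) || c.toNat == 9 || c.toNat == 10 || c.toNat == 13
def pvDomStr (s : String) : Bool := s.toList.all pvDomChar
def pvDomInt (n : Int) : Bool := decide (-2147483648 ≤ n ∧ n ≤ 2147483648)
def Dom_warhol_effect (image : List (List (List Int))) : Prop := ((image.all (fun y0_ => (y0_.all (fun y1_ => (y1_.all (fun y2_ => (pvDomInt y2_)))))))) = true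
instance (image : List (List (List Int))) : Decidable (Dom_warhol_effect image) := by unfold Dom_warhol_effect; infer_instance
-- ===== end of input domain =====

-- B collapses A's four full-image constructions and two combine passes into one loop over
-- the rows maintaining the two half-images (objective: simpler; return value only, no mutation).

-- ===== PORT A =====
-- helper combine_2pics: loop over range(len(image1)), appending image1[row] + image2[row]
def pv_combine_2pics (image1 image2 : List (List (List Int))) : List (List (List Int)) :=
  (PySem.List.pyRange 0 (image1.length : Int) 1).foldl
    (fun new_img row =>
      new_img ++ [PySem.List.pyGetD image1 row [] ++ PySem.List.pyGetD image2 row []]) []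

-- helper make_1_color: nested index loops; the final 'else []' is unreachable in warhol_effect
-- (color is always one of the three literals; in Python an unknown color would raise NameError)
def pv_make_1_color (image : List (List (List Int))) (color : String) : List (List (List Int)) :=
  (PySem.List.pyRange 0 (image.length : Int) 1).foldl
    (fun new_img row =>
      let r := PySem.List.pyGetD image row []
      let new_row := (PySem.List.pyRange 0 (r.length : Int) 1).foldl
        (fun nr i =>
          let px := PySem.List.pyGetD r i []
          let np :=
            if color = "red" then [PySem.List.pyGetD px 0 0, 0, 0]
            else if color = "green" then [0, PySem.List.pyGetD px 1 0, 0]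
            else if color = "blue" then [0, 0, PySem.List.pyGetD px 2 0]
            else []
          nr ++ [np]) []
      new_img ++ [new_row]) []

def warhol_effect (image : List (List (List Int))) : List (List (List Int)) :=
  let TR := pv_make_1_color image "red"
  let BL := pv_make_1_color image "blue"
  let BR := pv_make_1_color image "green"
  let TL := (PySem.List.pyRange 0 (image.length : Int) 1).foldl
    (fun tl row =>
      let r := PySem.List.pyGetD image row []
      let new_row := (PySem.List.pyRange 0 (r.length : Int) 1).foldl
        (fun nr i =>
          let px := PySem.List.pyGetD r i []
          nr ++ [[0, PySem.List.pyGetD px 1 0, PySem.List.pyGetD px 2 0]]) []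
      tl ++ [new_row]) []
  let top := pv_combine_2pics TL TR
  let btm := pv_combine_2pics BL BR
  top ++ btm

-- ===== PORT B =====
def warhol_effect_alt (image : List (List (List Int))) : List (List (List Int)) :=
  let p := image.foldl
    (fun (acc : List (List (List Int)) × List (List (List Int))) row =>
      (acc.1 ++ [row.map (fun px => [0, px.getD 1 0, px.getD 2 0]) ++
                 row.map (fun px => [px.getD 0 0, 0, 0])],
       acc.2 ++ [row.map (fun px => [0, 0, px.getD 2 0]) ++
                 row.map (fun px => [0, px.getD 1 0, 0])]))
    ([], [])
  p.1 ++ p.2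

-- ===== PRECONDITION & SPEC =====
-- Pre_ excludes images containing a pixel of fewer than 3 channels: there Python A raises
-- IndexError on px[0]/px[1]/px[2] (and Python B raises the same way).
def Pre_warhol_effect (image : List (List (List Int))) : Prop :=
  ∀ row ∈ image, ∀ px ∈ row, 3 ≤ px.length
instance (image : List (List (List Int))) : Decidable (Pre_warhol_effect image) := by
  unfold Pre_warhol_effect; infer_instance

def pvWitness_warhol_effect : List (List (List Int)) := [[[1, 2, 3], [4, 5, 6]], [[7, 8, 9]]]

def Spec_warhol_effect (image : List (List (List Int))) (out : List (List (List Int))) : Prop := out = warhol_effect_alt image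
instance (image : List (List (List Int))) (out : List (List (List Int))) : Decidable (Spec_warhol_effect image out) := by unfold Spec_warhol_effect; infer_instance

-- ===== CLAIM (what is proved, stated in full; the proofs are below) =====
def Claim_equal_warhol_effect : Prop := ∀ (image : List (List (List Int))), Dom_warhol_effect image → Pre_warhol_effect image → Spec_warhol_effect image (warhol_effect image)

-- ===== LEMMAS AND PROOFS =====

-- canonical pixel filters (proof-only abbreviations)
def pvTLpx (px : List Int) : List Int := [0, px.getD 1 0, px.getD 2 0]
def pvTRpx (px : List Int) : List Int := [px.getD 0 0, 0, 0]
def pvBLpx (px : List Int) : List Int := [0, 0, px.getD 2 0]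
def pvBRpx (px : List Int) : List Int := [0, px.getD 1 0, 0]

-- an index loop over range(len(l)) appending f(l[i]) is a map
theorem pv_loop_map {a b : Type} (d : a) (l : List a) (f : a -> b) :
    (PySem.List.pyRange 0 (l.length : Int) 1).foldl
      (fun acc i => acc ++ [f (PySem.List.pyGetD l i d)]) [] = l.map f := by
  rw [PySem.List.foldl_pyRange_zero_pyGetD' l d (fun acc x => acc ++ [f x]) []]
  simpa using PySem.List.foldl_append_singleton_eq_map f l []

-- A's inner row loops, one per pixel filter
theorem pv_row_red (r : List (List Int)) :
    (PySem.List.pyRange 0 (r.length : Int) 1).foldl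
      (fun nr i => nr ++ [[PySem.List.pyGetD (PySem.List.pyGetD r i []) 0 0, 0, 0]]) []
      = r.map pvTRpx := by
  exact (pv_loop_map [] r (fun px => [PySem.List.pyGetD px 0 0, 0, 0])).trans
    (by simp [pvTRpx, PySem.List.pyGetD_ofNat', List.getD])

theorem pv_row_green (r : List (List Int)) :
    (PySem.List.pyRange 0 (r.length : Int) 1).foldl
      (fun nr i => nr ++ [[0, PySem.List.pyGetD (PySem.List.pyGetD r i []) 1 0, 0]]) []
      = r.map pvBRpx := by
  exact (pv_loop_map [] r (fun px => [0, PySem.List.pyGetD px 1 0, 0])).trans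
    (by simp [pvBRpx, PySem.List.pyGetD_ofNat', List.getD])

theorem pv_row_blue (r : List (List Int)) :
    (PySem.List.pyRange 0 (r.length : Int) 1).foldl
      (fun nr i => nr ++ [[0, 0, PySem.List.pyGetD (PySem.List.pyGetD r i []) 2 0]]) []
      = r.map pvBLpx := by
  exact (pv_loop_map [] r (fun px => [0, 0, PySem.List.pyGetD px 2 0])).trans
    (by simp [pvBLpx, PySem.List.pyGetD_ofNat', List.getD])

theorem pv_row_tl (r : List (List Int)) :
    (PySem.List.pyRange 0 (r.length : Int) 1).foldl
      (fun nr i => nr ++ [[0, PySem.List.pyGetD (PySem.List.pyGetD r i []) 1 0,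
                              PySem.List.pyGetD (PySem.List.pyGetD r i []) 2 0]]) []
      = r.map pvTLpx := by
  exact (pv_loop_map [] r
      (fun px => [0, PySem.List.pyGetD px 1 0, PySem.List.pyGetD px 2 0])).trans
    (by simp [pvTLpx, PySem.List.pyGetD_ofNat', List.getD])

theorem pv_make_1_color_red (image : List (List (List Int))) :
    pv_make_1_color image "red" = image.map (fun r => r.map pvTRpx) := by
  simp only [pv_make_1_color, String.reduceEq, reduceIte]
  exact (pv_loop_map [] image
      (fun r => (PySem.List.pyRange 0 (r.length : Int) 1).foldl
        (fun nr i => nr ++ [[PySem.List.pyGetD (PySem.List.pyGetD r i []) 0 0, 0, 0]]) [])).trans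
    (by simp only [pv_row_red])

theorem pv_make_1_color_green (image : List (List (List Int))) :
    pv_make_1_color image "green" = image.map (fun r => r.map pvBRpx) := by
  simp only [pv_make_1_color, String.reduceEq, reduceIte]
  exact (pv_loop_map [] image
      (fun r => (PySem.List.pyRange 0 (r.length : Int) 1).foldl
        (fun nr i => nr ++ [[0, PySem.List.pyGetD (PySem.List.pyGetD r i []) 1 0, 0]]) [])).trans
    (by simp only [pv_row_green])

theorem pv_make_1_color_blue (image : List (List (List Int))) :
    pv_make_1_color image "blue" = image.map (fun r => r.map pvBLpx) := by
  simp only [pv_make_1_color, String.reduceEq, reduceIte]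
  exact (pv_loop_map [] image
      (fun r => (PySem.List.pyRange 0 (r.length : Int) 1).foldl
        (fun nr i => nr ++ [[0, 0, PySem.List.pyGetD (PySem.List.pyGetD r i []) 2 0]]) [])).trans
    (by simp only [pv_row_blue])

-- A's TL loop in warhol_effect
theorem pv_tl_image (image : List (List (List Int))) :
    (PySem.List.pyRange 0 (image.length : Int) 1).foldl
      (fun tl row =>
        tl ++ [(PySem.List.pyRange 0 ((PySem.List.pyGetD image row []).length : Int) 1).foldl
          (fun nr i => nr ++
            [[0, PySem.List.pyGetD (PySem.List.pyGetD (PySem.List.pyGetD image row []) i []) 1 0,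
                 PySem.List.pyGetD (PySem.List.pyGetD (PySem.List.pyGetD image row []) i []) 2 0]]) []]) []
      = image.map (fun r => r.map pvTLpx) := by
  exact (pv_loop_map [] image
      (fun r => (PySem.List.pyRange 0 (r.length : Int) 1).foldl
        (fun nr i => nr ++ [[0, PySem.List.pyGetD (PySem.List.pyGetD r i []) 1 0,
                                PySem.List.pyGetD (PySem.List.pyGetD r i []) 2 0]]) [])).trans
    (by simp only [pv_row_tl])

-- combine_2pics of two images mapped from the same list is the pointwise row concatenation
theorem pv_combine_maps (l : List (List (List Int)))
    (f g : List (List Int) -> List (List Int)) :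
    pv_combine_2pics (l.map f) (l.map g) = l.map (fun r => f r ++ g r) := by
  induction l using List.reverseRecOn with
  | nil => rfl
  | append_singleton xs x ih =>
    unfold pv_combine_2pics at ih ⊢
    have hlen : ((xs ++ [x]).map f).length = xs.length + 1 := by simp
    have hrange : PySem.List.pyRange 0 ((xs.length : Int) + 1) 1 =
        PySem.List.pyRange 0 (xs.length : Int) 1 ++ [(xs.length : Int)] :=
      PySem.List.pyRange_one_succ_right (by positivity)
    have hcast : ((xs.length + 1 : Nat) : Int) = (xs.length : Int) + 1 := by push_cast; ring
    rw [hlen, hcast, hrange, List.foldl_append]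
    have hpref : (PySem.List.pyRange 0 (xs.length : Int) 1).foldl
        (fun acc row => acc ++ [PySem.List.pyGetD ((xs ++ [x]).map f) row [] ++
                                PySem.List.pyGetD ((xs ++ [x]).map g) row []]) [] =
        (PySem.List.pyRange 0 (xs.length : Int) 1).foldl
        (fun acc row => acc ++ [PySem.List.pyGetD (xs.map f) row [] ++
                                PySem.List.pyGetD (xs.map g) row []]) [] := by
      apply PySem.List.foldl_congr_mem
      intro acc row hmem
      have hb := (PySem.List.mem_pyRange_one).1 hmem
      obtain ⟨k, rfl⟩ : ∃ k : Nat, row = (k : Int) := ⟨row.toNat, by omega⟩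
      have hk : k < xs.length := by exact_mod_cast hb.2
      have h1 : PySem.List.pyGetD ((xs ++ [x]).map f) (k : Int) [] =
          PySem.List.pyGetD (xs.map f) (k : Int) [] := by
        rw [PySem.List.pyGetD_natCast, PySem.List.pyGetD_natCast]
        simp only [List.map_append, List.getD]
        rw [List.getElem?_append_left (by simpa using hk)]
      have h2 : PySem.List.pyGetD ((xs ++ [x]).map g) (k : Int) [] =
          PySem.List.pyGetD (xs.map g) (k : Int) [] := by
        rw [PySem.List.pyGetD_natCast, PySem.List.pyGetD_natCast]
        simp only [List.map_append, List.getD]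
        rw [List.getElem?_append_left (by simpa using hk)]
      rw [h1, h2]
    have hlast1 : PySem.List.pyGetD ((xs ++ [x]).map f) (xs.length : Int) [] = f x := by
      rw [PySem.List.pyGetD_natCast]
      simp [List.getD]
    have hlast2 : PySem.List.pyGetD ((xs ++ [x]).map g) (xs.length : Int) [] = g x := by
      rw [PySem.List.pyGetD_natCast]
      simp [List.getD]
    have ih' : (PySem.List.pyRange 0 (xs.length : Int) 1).foldl
        (fun acc row => acc ++ [PySem.List.pyGetD (xs.map f) row [] ++
                                PySem.List.pyGetD (xs.map g) row []]) [] =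
        xs.map (fun r => f r ++ g r) := by
      have := ih
      rwa [List.length_map] at this
    rw [hpref, List.foldl_cons, List.foldl_nil, hlast1, hlast2, ih']
    simp

-- B's paired fold, characterised for an arbitrary accumulator
theorem pv_alt_fold (image : List (List (List Int)))
    (t b : List (List (List Int))) :
    image.foldl
      (fun (acc : List (List (List Int)) × List (List (List Int))) row =>
        (acc.1 ++ [row.map (fun px => [0, px.getD 1 0, px.getD 2 0]) ++
                   row.map (fun px => [px.getD 0 0, 0, 0])],
         acc.2 ++ [row.map (fun px => [0, 0, px.getD 2 0]) ++
                   row.map (fun px => [0, px.getD 1 0, 0])])) (t, b) =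
      (t ++ image.map (fun r => r.map pvTLpx ++ r.map pvTRpx),
       b ++ image.map (fun r => r.map pvBLpx ++ r.map pvBRpx)) := by
  induction image generalizing t b with
  | nil => simp
  | cons r rs ih =>
    simp only [List.foldl_cons]
    rw [ih]
    simp
    exact ⟨rfl, rfl⟩

-- ===== VERDICT (by name: the statement is the Claim_ definition above) =====
theorem warhol_effect_spec : Claim_equal_warhol_effect := by
  intro image _ _
  unfold Spec_warhol_effect
  show warhol_effect image = warhol_effect_alt image
  simp only [warhol_effect, warhol_effect_alt]
  rw [pv_make_1_color_red, pv_make_1_color_green, pv_make_1_color_blue, pv_tl_image,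
      pv_alt_fold, pv_combine_maps, pv_combine_maps]
  simp
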